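-- pv_equiv track=rewrite | github.com/masonc08/algs | contests/leetcode_biweekly/43/maximum_score_from_removing_substrings.py | search
-- ===== SOURCE A (Python) =====
-- def search(A, query, pts):
--     sol, stk = 0, []
--     for c in A:
--         if stk and stk[-1] + c == query:
--             stk.pop()
--             sol += pts
--         else:
--             stk += c,
--     return sol, stk
-- ===== SOURCE B (Python) =====
-- def search(A, query, pts):
--     # Rewrite-to-normal-form: repeatedly delete every occurrence of the pair until
--     # none remains (single-pair deletion is confluent, so this reaches the same
--     # irreducible string as a greedy stack); score = pairs removed * pts.
--     # The loop only applies to two-char queries: only those can ever be removed,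
--     # and an empty query would make the rewrite loop meaningless.
--     n = len(A)
--     if len(query) == 2:
--         while query in A:
--             A = A.replace(query, '')
--     return ((n - len(A)) // 2) * pts, list(A)
-- ===== Notes on version B (the rewrite author's own statement) =====
-- stated objective: alternative
-- what changed: B abandons the single-pass scoring stack: it repeatedly rewrites the whole string with str.replace(query, '') until no occurrence remains (pair deletion is confluent, so this reaches the same irreducible string as A's stack) and computes the score in closed form from the number of deleted characters; only a two-character query can ever be removed, hence the length guard.
import Mathlib
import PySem

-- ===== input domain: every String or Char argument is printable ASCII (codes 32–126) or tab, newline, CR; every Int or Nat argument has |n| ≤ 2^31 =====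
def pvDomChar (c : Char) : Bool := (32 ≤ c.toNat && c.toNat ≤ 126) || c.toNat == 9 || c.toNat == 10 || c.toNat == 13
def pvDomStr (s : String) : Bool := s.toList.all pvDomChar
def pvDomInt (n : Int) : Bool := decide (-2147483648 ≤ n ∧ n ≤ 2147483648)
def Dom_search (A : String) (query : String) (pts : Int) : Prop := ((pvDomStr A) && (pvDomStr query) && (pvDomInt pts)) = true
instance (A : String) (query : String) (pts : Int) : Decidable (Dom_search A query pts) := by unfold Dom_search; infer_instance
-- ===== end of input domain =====

-- B replaces A's one-pass scoring stack by iterated whole-string rewriting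
-- (str.replace of the pair until none is left; pair deletion is confluent) with the
-- score computed from the number of deleted characters (objective: alternative).

-- ===== PORT A =====
-- loop body of A: 'if stk and stk[-1] + c == query: stk.pop(); sol += pts  else: stk += c,'
def searchStepA (query : String) (pts : Int) (st : Int × List String) (c : Char) : Int × List String :=
  match st.2.getLast? with
  | some t => if t ++ String.singleton c = query then (st.1 + pts, st.2.dropLast)
              else (st.1, st.2 ++ [String.singleton c])
  | none => (st.1, st.2 ++ [String.singleton c])

def search (A : String) (query : String) (pts : Int) : Int × List String :=
  A.toList.foldl (searchStepA query pts) (0, [])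

-- ===== PORT B =====
-- Source B's 'while query in A: A = A.replace(query, "")', made total with a fuel of
-- len(A) iterations (each iteration that runs removes at least two characters, so
-- the fuel is never exhausted; adequacy is proved below, not assumed).
def repLoop (query : String) (fuel : Nat) (A : String) : String :=
  match fuel with
  | 0 => A
  | f + 1 => if PySem.Str.isIn query A then repLoop query f (PySem.Str.replace A query "") else A

def search_alt (A : String) (query : String) (pts : Int) : Int × List String :=
  let n := PySem.Str.len A
  let A' := if PySem.Str.len query = 2 then repLoop query A.toList.length A else A
  (PySem.Int.floordiv (n - PySem.Str.len A') 2 * pts, A'.toList.map String.singleton)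

-- ===== PRECONDITION & SPEC =====
def Spec_search (A : String) (query : String) (pts : Int) (out : Int × List String) : Prop := out = search_alt A query pts
instance (A : String) (query : String) (pts : Int) (out : Int × List String) : Decidable (Spec_search A query pts out) := by unfold Spec_search; infer_instance

-- ===== CLAIM (what is proved, stated in full; the proofs are below) =====
def Claim_equal_search : Prop := ∀ (A : String) (query : String) (pts : Int), Dom_search A query pts → Spec_search A query pts (search A query pts)

-- ===== LEMMAS AND PROOFS =====

-- char-level front stack for A (A's stack reversed), scanned left to right
def stepC (q : String) (s : List Char) (c : Char) : List Char :=
  match s with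
  | t :: r => if q.toList = [t, c] then r else c :: t :: r
  | [] => [c]

-- char-level A step carrying the score
def stepAC (q : String) (pts : Int) (st : Int × List Char) (c : Char) : Int × List Char :=
  match st with
  | (sol, t :: r) => if q.toList = [t, c] then (sol + pts, r) else (sol, c :: t :: r)
  | (sol, []) => (sol, [c])

-- one replace pass: delete the non-overlapping occurrences of [x, y] left to right
def rep (x y : Char) : List Char → List Char
  | [] => []
  | [c] => [c]
  | c :: d :: t => if c = x ∧ d = y then rep x y t else c :: rep x y (d :: t)

theorem sing_append_eq_iff (x y : Char) (q : String) :
    (String.singleton x ++ String.singleton y = q) ↔ q.toList = [x, y] := by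
  constructor
  · intro h; rw [← h]; simp
  · intro h
    apply String.toList_inj.mp
    simpa using h.symm

-- A's string fold, on a stack of singletons, is the char-level fold
theorem A_to_char (q : String) (pts : Int) :
    ∀ (cs : List Char) (sol : Int) (s : List Char),
      cs.foldl (searchStepA q pts) (sol, (s.map String.singleton).reverse)
        = ((cs.foldl (stepAC q pts) (sol, s)).1,
           (((cs.foldl (stepAC q pts) (sol, s)).2).map String.singleton).reverse) := by
  intro cs
  induction cs with
  | nil => intro sol s; simp
  | cons c cs ih =>
    intro sol s
    have hstep : searchStepA q pts (sol, (s.map String.singleton).reverse) c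
        = ((stepAC q pts (sol, s) c).1,
           ((stepAC q pts (sol, s) c).2.map String.singleton).reverse) := by
      cases s with
      | nil => simp [searchStepA, stepAC]
      | cons t r =>
        simp only [searchStepA, stepAC, List.map_cons, List.reverse_cons]
        rw [List.getLast?_concat]
        simp only [sing_append_eq_iff]
        by_cases h : q.toList = [t, c]
        · simp [h]
        · simp [h, List.reverse_cons]
    rw [List.foldl_cons, hstep, List.foldl_cons]
    have := ih (stepAC q pts (sol, s) c).1 (stepAC q pts (sol, s) c).2
    simpa using this

-- the score component: pts per cancellation, two chars removed per cancellation
theorem count_lemma (q : String) (pts : Int) :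
    ∀ (cs : List Char) (sol : Int) (s : List Char),
      ∃ k : ℕ, cs.foldl (stepAC q pts) (sol, s) = (sol + pts * k, cs.foldl (stepC q) s)
        ∧ s.length + cs.length = (cs.foldl (stepC q) s).length + 2 * k := by
  intro cs
  induction cs with
  | nil => intro sol s; exact ⟨0, by simp⟩
  | cons c cs ih =>
    intro sol s
    cases s with
    | nil =>
      obtain ⟨k, h1, h2⟩ := ih sol [c]
      have e : stepC q ([] : List Char) c = [c] := rfl
      refine ⟨k, ?_, ?_⟩
      · simp only [List.foldl_cons]; exact h1
      · have hg : List.foldl (stepC q) ([] : List Char) (c :: cs) = List.foldl (stepC q) [c] cs := by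
          rw [List.foldl_cons, e]
        rw [hg]
        simp only [List.length_cons, List.length_nil] at h2 ⊢
        omega
    | cons t r =>
      by_cases h : q.toList = [t, c]
      · have hA : stepAC q pts (sol, t :: r) c = (sol + pts, r) := by simp [stepAC, h]
        have hC : stepC q (t :: r) c = r := by simp [stepC, h]
        obtain ⟨k, h1, h2⟩ := ih (sol + pts) r
        refine ⟨k + 1, ?_, ?_⟩
        · rw [List.foldl_cons, List.foldl_cons, hA, hC, h1]
          congr 1
          push_cast
          ring
        · rw [List.foldl_cons, hC]
          simp only [List.length_cons]
          omega
      · have hA : stepAC q pts (sol, t :: r) c = (sol, c :: t :: r) := by simp [stepAC, h]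
        have hC : stepC q (t :: r) c = c :: t :: r := by simp [stepC, h]
        obtain ⟨k, h1, h2⟩ := ih sol (c :: t :: r)
        refine ⟨k, ?_, ?_⟩
        · rw [List.foldl_cons, List.foldl_cons, hA, hC, h1]
        · rw [List.foldl_cons, hC]
          simp only [List.length_cons] at h2 ⊢
          omega

-- the invariant: the front stack never contains an adjacent cancellable pair
theorem stepC_irr (q : String) (s : List Char) (c : Char)
    (hs : List.IsChain (fun y x => q.toList ≠ [x, y]) s) :
    List.IsChain (fun y x => q.toList ≠ [x, y]) (stepC q s c) := by
  cases s with
  | nil => exact List.isChain_singleton c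
  | cons t r =>
    by_cases h : q.toList = [t, c]
    · have : stepC q (t :: r) c = r := by simp [stepC, h]
      rw [this]
      exact hs.tail
    · have : stepC q (t :: r) c = c :: t :: r := by simp [stepC, h]
      rw [this]
      exact List.isChain_cons_cons.mpr ⟨h, hs⟩

-- feeding both halves of a cancelled pair into an irreducible stack is a no-op
theorem stepC_cancel (q : String) (s : List Char) (c d : Char)
    (hs : List.IsChain (fun y x => q.toList ≠ [x, y]) s)
    (hcd : q.toList = [c, d]) :
    stepC q (stepC q s c) d = s := by
  cases s with
  | nil => simp [stepC, hcd]
  | cons t r =>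
    by_cases h : q.toList = [t, c]
    · have h12 : t = c ∧ c = d := by
        rw [hcd] at h
        simp at h
        exact ⟨h.1.symm, h.2.symm⟩
      obtain ⟨h1, h2⟩ := h12
      subst h2
      subst h1
      have hcan : stepC q (t :: r) t = r := by simp [stepC, h]
      rw [hcan]
      cases r with
      | nil => simp [stepC]
      | cons u r1 =>
        have hu : q.toList ≠ [u, t] := List.isChain_cons_cons.mp hs |>.1
        simp [stepC, hu]
    · have hpush : stepC q (t :: r) c = c :: t :: r := by simp [stepC, h]
      rw [hpush]
      simp [stepC, hcd]

-- feeding an irreducible word into a compatible irreducible stack just stacks it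
theorem unwind_lemma (q : String) :
    ∀ (r s : List Char),
      List.IsChain (fun x y => q.toList ≠ [x, y]) r →
      List.IsChain (fun y x => q.toList ≠ [x, y]) s →
      (∀ t0 d, s.head? = some t0 → r.head? = some d → q.toList ≠ [t0, d]) →
      r.foldl (stepC q) s = r.reverse ++ s := by
  intro r
  induction r with
  | nil => intro s _ _ _; simp
  | cons d r' ih =>
    intro s hr hs hj
    have hpush : stepC q s d = d :: s := by
      cases s with
      | nil => rfl
      | cons t0 r0 =>
        have := hj t0 d rfl rfl
        simp [stepC, this]
    rw [List.foldl_cons, hpush,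
        ih (d :: s) hr.tail ?_ ?_]
    · simp
    · refine List.isChain_cons.mpr ⟨?_, hs⟩
      intro y hy
      cases s with
      | nil => simp at hy
      | cons a s' =>
        simp only [List.head?_cons, Option.mem_def, Option.some.injEq] at hy
        subst hy
        exact hj a d rfl rfl
    · intro t0 e ht0 he
      simp only [List.head?_cons, Option.some.injEq] at ht0
      subst ht0
      exact (List.isChain_cons.mp hr).1 e he

-- PySem's one replace pass with a two-char pattern and empty replacement IS rep
theorem replace_go_eq_rep (x y : Char) :
    ∀ (fuel : Nat) (l acc : List Char), l.length ≤ fuel →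
      PySem.Chars.replace.go [x, y] [] fuel l acc = acc.reverse ++ rep x y l := by
  intro fuel
  induction fuel with
  | zero =>
    intro l acc hl
    have h0 : l = [] := List.length_eq_zero_iff.mp (Nat.le_zero.mp hl)
    subst h0
    simp [PySem.Chars.replace.go, rep]
  | succ f ih =>
    intro l acc hl
    cases l with
    | nil => simp [PySem.Chars.replace.go, rep]
    | cons c t =>
      have hgo : PySem.Chars.replace.go [x, y] [] (f + 1) (c :: t) acc
          = if List.isPrefixOf [x, y] (c :: t) = true
            then PySem.Chars.replace.go [x, y] [] f (List.drop (List.length [x, y]) (c :: t)) (List.reverse [] ++ acc)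
            else PySem.Chars.replace.go [x, y] [] f t (c :: acc) := rfl
      by_cases hp : List.isPrefixOf [x, y] (c :: t) = true
      · obtain ⟨u, hu⟩ := List.isPrefixOf_iff_prefix.mp hp
        have hu' : x :: y :: u = c :: t := hu
        injection hu' with h1 h2
        subst h1
        subst h2
        rw [hgo, if_pos hp]
        have hd : List.drop (List.length [x, y]) (x :: y :: u) = u := rfl
        rw [hd]
        have hrec := ih u acc (by simp at hl; omega)
        simp only [List.reverse_nil, List.nil_append]
        rw [hrec]
        simp [rep]
      · rw [hgo, if_neg hp]
        rw [ih t (c :: acc) (by simp at hl; omega)]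
        have hrep : rep x y (c :: t) = c :: rep x y t := by
          cases t with
          | nil => rfl
          | cons d t'' =>
            have hne : ¬ (c = x ∧ d = y) := by
              rintro ⟨h1, h2⟩
              subst h1; subst h2
              exact hp (List.isPrefixOf_iff_prefix.mpr ⟨t'', by simp⟩)
            simp [rep, hne]
        rw [hrep]
        simp

-- rep never lengthens, and removes at least one pair when one occurs
theorem replace_eq_rep (x y : Char) (s : List Char) :
    PySem.Chars.replace s [x, y] [] = rep x y s := by
  have h := replace_go_eq_rep x y s.length s [] le_rfl
  simp only [List.reverse_nil, List.nil_append] at h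
  rw [PySem.Chars.replace]
  simp [h]

-- rep never lengthens, and removes at least one pair when one occurs
theorem rep_length (x y : Char) :
    ∀ (n : Nat) (l : List Char), l.length ≤ n →
      (rep x y l).length ≤ l.length ∧ ([x, y] <:+: l → (rep x y l).length + 2 ≤ l.length) := by
  intro n
  induction n with
  | zero =>
    intro l hl
    have h0 : l = [] := List.length_eq_zero_iff.mp (Nat.le_zero.mp hl)
    subst h0
    refine ⟨by simp [rep], ?_⟩
    intro h
    have := h.length_le
    simp at this
  | succ m ih =>
    intro l hl
    match l with
    | [] =>
      refine ⟨by simp [rep], ?_⟩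
      intro h; have := h.length_le; simp at this
    | [c] =>
      refine ⟨by simp [rep], ?_⟩
      intro h; have := h.length_le; simp at this
    | c :: d :: t =>
      by_cases h : c = x ∧ d = y
      · have hr : rep x y (c :: d :: t) = rep x y t := by simp [rep, h]
        obtain ⟨ha, _⟩ := ih t (by simp at hl; omega)
        rw [hr]
        simp only [List.length_cons]
        exact ⟨by omega, fun _ => by omega⟩
      · have hr : rep x y (c :: d :: t) = c :: rep x y (d :: t) := by simp [rep, h]
        obtain ⟨ha, hb⟩ := ih (d :: t) (by simp at hl; simp; omega)
        have ha' : (rep x y (d :: t)).length ≤ t.length + 1 := by simpa using ha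
        rw [hr]
        simp only [List.length_cons]
        refine ⟨by omega, ?_⟩
        intro hinf
        have htail : [x, y] <:+: d :: t := by
          rcases List.infix_cons_iff.mp hinf with hpre | htl
          · exfalso
            obtain ⟨u, hu⟩ := hpre
            have hu' : x :: y :: u = c :: d :: t := hu
            injection hu' with h1 h2
            injection h2 with h2 _
            exact h ⟨h1.symm, h2.symm⟩
          · exact htl
        have hb' : (rep x y (d :: t)).length + 2 ≤ t.length + 1 := by simpa using hb htail
        omega

-- a string with no occurrence of the pair is an irreducible chain
theorem chain_of_no_infix (q : String) (x y : Char) (hq : q.toList = [x, y]) :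
    ∀ (l : List Char), ¬ [x, y] <:+: l → List.IsChain (fun a b => q.toList ≠ [a, b]) l := by
  intro l
  induction l with
  | nil => intro _; exact List.isChain_nil
  | cons c t ih =>
    intro h
    cases t with
    | nil => exact List.isChain_singleton c
    | cons d t' =>
      refine List.isChain_cons_cons.mpr ⟨?_, ih ?_⟩
      · intro hcd
        rw [hq] at hcd
        have hx : x = c ∧ y = d := by
          injection hcd with h1 h2
          injection h2 with h2 _
          exact ⟨h1, h2⟩
        apply h
        rw [hx.1, hx.2]
        exact ⟨[], t', by simp⟩
      · intro h'
        exact h (h'.trans (List.suffix_cons c (d :: t')).isInfix)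

-- one replace pass keeps the left-to-right stack fold unchanged
theorem rep_fold (q : String) (x y : Char) (hq : q.toList = [x, y]) :
    ∀ (n : Nat) (l : List Char), l.length ≤ n →
      ∀ (s : List Char), List.IsChain (fun b a => q.toList ≠ [a, b]) s →
        (rep x y l).foldl (stepC q) s = l.foldl (stepC q) s := by
  intro n
  induction n with
  | zero =>
    intro l hl s _
    have : l = [] := List.length_eq_zero_iff.mp (Nat.le_zero.mp hl)
    subst this; rfl
  | succ m ih =>
    intro l hl s hs
    match l with
    | [] => rfl
    | [c] => rfl
    | c :: d :: t =>
      by_cases h : c = x ∧ d = y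
      · have hr : rep x y (c :: d :: t) = rep x y t := by simp [rep, h]
        rw [hr, ih t (by simp at hl; omega) s hs]
        have hfold2 : List.foldl (stepC q) s (c :: d :: t) = List.foldl (stepC q) (stepC q (stepC q s c) d) t := by
          simp [List.foldl_cons]
        rw [hfold2, stepC_cancel q s c d hs (by rw [h.1, h.2]; exact hq)]
      · have hr : rep x y (c :: d :: t) = c :: rep x y (d :: t) := by simp [rep, h]
        rw [hr, List.foldl_cons, List.foldl_cons,
            ih (d :: t) (by simp at hl; simp; omega) (stepC q s c) (stepC_irr q s c hs)]

-- the rewrite loop: enough fuel yields an irreducible residue with the same stack fold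
theorem loop_spec (q : String) (x y : Char) (hq : q.toList = [x, y]) :
    ∀ (fuel : Nat) (A : String), A.toList.length ≤ fuel →
      (¬ [x, y] <:+: (repLoop q fuel A).toList) ∧
      ∀ (s : List Char), List.IsChain (fun b a => q.toList ≠ [a, b]) s →
        (repLoop q fuel A).toList.foldl (stepC q) s = A.toList.foldl (stepC q) s := by
  intro fuel
  induction fuel with
  | zero =>
    intro A hA
    have h0 : A.toList = [] := List.length_eq_zero_iff.mp (Nat.le_zero.mp hA)
    have hid : repLoop q 0 A = A := rfl
    rw [hid]
    refine ⟨?_, fun s _ => rfl⟩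
    rw [h0]
    intro h; have := h.length_le; simp at this
  | succ f ih =>
    intro A hA
    have hif : repLoop q (f + 1) A
        = if PySem.Str.isIn q A then repLoop q f (PySem.Str.replace A q "") else A := rfl
    by_cases hin : PySem.Str.isIn q A = true
    · have hinf : [x, y] <:+: A.toList := by
        have h1 : PySem.Chars.isIn q.toList A.toList = true := by
          rw [← PySem.Str.isIn_eq]; exact hin
        have := (PySem.Chars.isIn_iff_infix q.toList A.toList).mp h1
        rwa [hq] at this
      have hstep : repLoop q (f + 1) A = repLoop q f (PySem.Str.replace A q "") := by
        rw [hif, if_pos hin]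
      have hrepl : (PySem.Str.replace A q "").toList = rep x y A.toList := by
        rw [PySem.Str.toList_replace, hq]
        have h2 : ("" : String).toList = [] := rfl
        rw [h2, replace_eq_rep]
      have hlen : (PySem.Str.replace A q "").toList.length ≤ f := by
        rw [hrepl]
        have := (rep_length x y A.toList.length A.toList le_rfl).2 hinf
        omega
      obtain ⟨h1, h2⟩ := ih (PySem.Str.replace A q "") hlen
      rw [hstep]
      refine ⟨h1, fun s hs => ?_⟩
      rw [h2 s hs, hrepl, rep_fold q x y hq A.toList.length A.toList le_rfl s hs]
    · have hstep : repLoop q (f + 1) A = A := by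
        rw [hif, if_neg hin]
      rw [hstep]
      refine ⟨?_, fun s _ => rfl⟩
      have hfalse : PySem.Chars.isIn q.toList A.toList = false := by
        rw [← PySem.Str.isIn_eq]
        exact Bool.not_eq_true _ ▸ eq_false_of_ne_true hin
      have := (PySem.Chars.isIn_eq_false_iff q.toList A.toList).mp hfalse
      rwa [hq] at this

-- with a query that is not two characters long, A's stack never cancels
theorem no_cancel (q : String) (pts : Int) (hq : q.toList.length ≠ 2) :
    ∀ (cs : List Char) (sol : Int) (s : List Char),
      cs.foldl (stepAC q pts) (sol, s) = (sol, cs.reverse ++ s) := by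
  intro cs
  induction cs with
  | nil => intro sol s; simp
  | cons c cs ih =>
    intro sol s
    have hstep : stepAC q pts (sol, s) c = (sol, c :: s) := by
      cases s with
      | nil => rfl
      | cons t r =>
        have : q.toList ≠ [t, c] := by intro h; rw [h] at hq; simp at hq
        simp [stepAC, this]
    rw [List.foldl_cons, hstep, ih]
    simp

-- Python's floor division of an even natural doubling by 2
theorem floordiv_two_mul (k : ℕ) : PySem.Int.floordiv (2 * (k : Int)) 2 = k := by
  simp [PySem.Int.floordiv]

-- ===== VERDICT (by name: the statement is the Claim_ definition above) =====
theorem search_spec : Claim_equal_search := by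
  intro A q pts _
  unfold Spec_search search search_alt
  simp only [PySem.Str.len_eq]
  by_cases hq2 : ((q.toList.length : Int) = 2)
  · obtain ⟨x, y, hq⟩ : ∃ x y, q.toList = [x, y] := by
      have hlen : q.toList.length = 2 := by exact_mod_cast hq2
      exact List.length_eq_two.mp hlen
    simp only [if_pos hq2]
    obtain ⟨hnoinf, hfold⟩ := loop_spec q x y hq A.toList.length A le_rfl
    set r := (repLoop q A.toList.length A).toList with hr
    have hN : A.toList.foldl (stepC q) [] = r.reverse := by
      rw [← hfold [] List.isChain_nil,
          unwind_lemma q r [] (by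
            have := chain_of_no_infix q x y hq r hnoinf
            exact this) List.isChain_nil (by simp)]
      simp
    have hA := A_to_char q pts A.toList 0 []
    simp only [List.map_nil, List.reverse_nil] at hA
    obtain ⟨k, hk1, hk2⟩ := count_lemma q pts A.toList 0 []
    have hstack : A.toList.foldl (searchStepA q pts) (0, []) = (pts * k, r.map String.singleton) := by
      rw [hA, hk1, hN]
      simp
    rw [hstack]
    have hlen2 : A.toList.length = r.length + 2 * k := by
      have h3 := congrArg List.length hN
      rw [List.length_reverse] at h3
      simp only [List.length_nil] at hk2
      omega
    have hd : ((A.toList.length : Int) - (r.length : Int)) = 2 * (k : Int) := by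
      push_cast [hlen2]; ring
    rw [hd, floordiv_two_mul]
    exact Prod.ext (mul_comm pts (k : Int)) rfl
  · simp only [if_neg hq2]
    have hne : q.toList.length ≠ 2 := by
      intro h; apply hq2; exact_mod_cast h
    have hA := A_to_char q pts A.toList 0 []
    simp only [List.map_nil, List.reverse_nil] at hA
    rw [hA, no_cancel q pts hne A.toList 0 []]
    simp
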